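-- pv_equiv track=rewrite | github.com/BlackDeathWarrior/garment-web-scraper | scraper/collect.py | _balance_gender_sequence
-- ===== SOURCE A (Python) =====
-- from collections import deque
--
-- def _balance_gender_sequence(products: list[dict]) -> list[dict]:
--     queues = {
--         "Men": deque(),
--         "Women": deque(),
--         "Other": deque(),
--     }
--     for item in products:
--         gender = item.get("target_gender")
--         if gender in ("Men", "Women"):
--             queues[gender].append(item)
--         else:
--             queues["Other"].append(item)
--
--     balanced: list[dict] = []
--     primary_gender = "Women" if len(queues["Women"]) > len(queues["Men"]) else "Men"
--     secondary_gender = "Men" if primary_gender == "Women" else "Women"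
--
--     while queues["Men"] or queues["Women"]:
--         if queues[primary_gender]:
--             balanced.append(queues[primary_gender].popleft())
--
--         if queues[secondary_gender]:
--             balanced.append(queues[secondary_gender].popleft())
--
--     return [*balanced, *list(queues["Other"])]
-- ===== SOURCE B (Python) =====
-- def _balance_gender_sequence(products: list[dict]) -> list[dict]:
--     # Rank-and-sort: give every product a distinct integer rank encoding its
--     # final position (primary gender -> even slots, secondary -> odd slots,
--     # everything else after the interleave in original order), then sort once.
--     n = len(products)
--     men_total = sum(1 for p in products if p.get("target_gender") == "Men")
--     women_total = sum(1 for p in products if p.get("target_gender") == "Women")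
--     primary = "Women" if women_total > men_total else "Men"
--
--     ranks = []
--     seen_men = 0
--     seen_women = 0
--     for pos, item in enumerate(products):
--         g = item.get("target_gender")
--         if g == "Men":
--             ranks.append(2 * seen_men if primary == "Men" else 2 * seen_men + 1)
--             seen_men += 1
--         elif g == "Women":
--             ranks.append(2 * seen_women if primary == "Women" else 2 * seen_women + 1)
--             seen_women += 1
--         else:
--             ranks.append(2 * n + pos)
--
--     return [item for _, item in sorted(zip(ranks, products), key=lambda t: t[0])]
-- ===== Notes on version B (the rewrite author's own statement) =====
-- stated objective: alternative
-- what changed: Replaces the deque dict + destructive popleft while-loop by a rank-and-sort scheme: every product gets a distinct integer rank encoding its final slot (primary gender -> even slots, secondary -> odd slots, others after the interleave in original order) and the result is one sort of the (rank, item) pairs.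
import Mathlib
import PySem

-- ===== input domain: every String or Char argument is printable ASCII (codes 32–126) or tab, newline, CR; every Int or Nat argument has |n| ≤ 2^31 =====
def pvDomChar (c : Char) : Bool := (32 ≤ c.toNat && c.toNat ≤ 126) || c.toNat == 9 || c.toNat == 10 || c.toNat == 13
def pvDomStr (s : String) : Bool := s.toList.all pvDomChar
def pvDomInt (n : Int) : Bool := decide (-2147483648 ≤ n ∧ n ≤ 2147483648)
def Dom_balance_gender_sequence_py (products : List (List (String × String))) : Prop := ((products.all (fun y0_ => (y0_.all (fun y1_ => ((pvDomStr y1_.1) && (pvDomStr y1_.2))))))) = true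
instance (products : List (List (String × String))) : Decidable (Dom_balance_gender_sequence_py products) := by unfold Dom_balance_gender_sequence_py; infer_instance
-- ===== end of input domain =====

-- B replaces A's deque dict + popleft while-loop by a rank-and-sort scheme: each product
-- gets a distinct integer rank encoding its final slot, then one sort (alternative algorithm,
-- same return value; neither version mutates its argument).

-- shared primitive: Python item.get("target_gender") on an assoc-list dict (first match)
def pyDictGet : List (String × String) → String → Option String
  | [], _ => none
  | (k, v) :: rest, key => if k = key then some v else pyDictGet rest key

-- ===== PORT A =====
-- the while-loop: pop from primary (if nonempty) then secondary (if nonempty), until both empty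
def aLoop : List (List (String × String)) → List (List (String × String)) → List (List (String × String)) → List (List (String × String))
  | [], [], acc => acc
  | [], y :: ys, acc => aLoop [] ys (acc ++ [y])
  | x :: xs, [], acc => aLoop xs [] (acc ++ [x])
  | x :: xs, y :: ys, acc => aLoop xs ys (acc ++ [x] ++ [y])

def balance_gender_sequence_py (products : List (List (String × String))) : List (List (String × String)) :=
  -- queues: (Men, Women, Other), filled by one for-loop over products
  let queues := products.foldl
    (fun (q : List (List (String × String)) × List (List (String × String)) × List (List (String × String))) item =>
      let gender := pyDictGet item "target_gender"
      if gender = some "Men" then (q.1 ++ [item], q.2.1, q.2.2)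
      else if gender = some "Women" then (q.1, q.2.1 ++ [item], q.2.2)
      else (q.1, q.2.1, q.2.2 ++ [item]))
    ([], [], [])
  let primary := if queues.2.1.length > queues.1.length then queues.2.1 else queues.1
  let secondary := if queues.2.1.length > queues.1.length then queues.1 else queues.2.1
  aLoop primary secondary [] ++ queues.2.2

-- ===== PORT B =====
-- the for-loop over enumerate(products): build the rank list with the two seen-counters
def bRankLoop : List (Int × List (String × String)) → String → Int → Int → Int → List Int → List Int
  | [], _, _, _, _, ranks => ranks
  | (pos, item) :: rest, primary, n, seenMen, seenWomen, ranks =>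
    let g := pyDictGet item "target_gender"
    if g = some "Men" then
      bRankLoop rest primary n (seenMen + 1) seenWomen (ranks ++ [if primary = "Men" then 2 * seenMen else 2 * seenMen + 1])
    else if g = some "Women" then
      bRankLoop rest primary n seenMen (seenWomen + 1) (ranks ++ [if primary = "Women" then 2 * seenWomen else 2 * seenWomen + 1])
    else
      bRankLoop rest primary n seenMen seenWomen (ranks ++ [2 * n + pos])

def balance_gender_sequence_py_alt (products : List (List (String × String))) : List (List (String × String)) :=
  let n : Int := products.length
  let menTotal : Int := (products.map (fun p => if pyDictGet p "target_gender" = some "Men" then (1 : Int) else 0)).sum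
  let womenTotal : Int := (products.map (fun p => if pyDictGet p "target_gender" = some "Women" then (1 : Int) else 0)).sum
  let primary := if womenTotal > menTotal then "Women" else "Men"
  let ranks := bRankLoop (PySem.List.enumerate products 0) primary n 0 0 []
  (PySem.List.sorted (ranks.zip products) (fun t => t.1) false).map (fun t => t.2)

-- ===== PRECONDITION & SPEC =====
def Spec_balance_gender_sequence_py (products : List (List (String × String))) (out : List (List (String × String))) : Prop := out = balance_gender_sequence_py_alt products
instance (products : List (List (String × String))) (out : List (List (String × String))) : Decidable (Spec_balance_gender_sequence_py products out) := by unfold Spec_balance_gender_sequence_py; infer_instance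

-- ===== CLAIM (what is proved, stated in full; the proofs are below) =====
def Claim_equal_balance_gender_sequence_py : Prop := ∀ (products : List (List (String × String))), Dom_balance_gender_sequence_py products → Spec_balance_gender_sequence_py products (balance_gender_sequence_py products)

-- ===== LEMMAS AND PROOFS =====

-- proof-only helpers -------------------------------------------------------

-- the rank list B's loop produces, without the accumulator
def ranksOf : List (List (String × String)) → String → Int → Int → Int → Int → List Int
  | [], _, _, _, _, _ => []
  | p :: t, pr, n, sm, sw, s =>
    if pyDictGet p "target_gender" = some "Men" then
      (if pr = "Men" then 2 * sm else 2 * sm + 1) :: ranksOf t pr n (sm + 1) sw (s + 1)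
    else if pyDictGet p "target_gender" = some "Women" then
      (if pr = "Women" then 2 * sw else 2 * sw + 1) :: ranksOf t pr n sm (sw + 1) (s + 1)
    else
      (2 * n + s) :: ranksOf t pr n sm sw (s + 1)

-- the keyed list (rank, item) the loop implicitly defines
def keyedOf : List (List (String × String)) → String → Int → Int → Int → Int → List (Int × List (String × String))
  | [], _, _, _, _, _ => []
  | p :: t, pr, n, sm, sw, s =>
    if pyDictGet p "target_gender" = some "Men" then
      ((if pr = "Men" then 2 * sm else 2 * sm + 1), p) :: keyedOf t pr n (sm + 1) sw (s + 1)
    else if pyDictGet p "target_gender" = some "Women" then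
      ((if pr = "Women" then 2 * sw else 2 * sw + 1), p) :: keyedOf t pr n sm (sw + 1) (s + 1)
    else
      (2 * n + s, p) :: keyedOf t pr n sm sw (s + 1)

-- a list keyed by consecutive values f j, f (j+1), …
def label : List (List (String × String)) → Int → (Int → Int) → List (Int × List (String × String))
  | [], _, _ => []
  | x :: t, j, f => (f j, x) :: label t (j + 1) f

-- the "Other" items keyed by 2n + position
def labelO : List (List (String × String)) → Int → Int → List (Int × List (String × String))
  | [], _, _ => []
  | p :: t, n, s =>
    if pyDictGet p "target_gender" = some "Men" then labelO t n (s + 1)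
    else if pyDictGet p "target_gender" = some "Women" then labelO t n (s + 1)
    else (2 * n + s, p) :: labelO t n (s + 1)

-- plain interleave (A's while-loop without the accumulator), on any element type
def inter {α : Type} : List α → List α → List α
  | [], [] => []
  | [], y :: ys => y :: inter [] ys
  | x :: xs, [] => x :: inter xs []
  | x :: xs, y :: ys => x :: y :: inter xs ys

-- A-side lemmas ------------------------------------------------------------

theorem partition_eq (l : List (List (String × String)))
    (m w o : List (List (String × String))) :
    l.foldl
      (fun (q : List (List (String × String)) × List (List (String × String)) × List (List (String × String))) item =>
        let gender := pyDictGet item "target_gender"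
        if gender = some "Men" then (q.1 ++ [item], q.2.1, q.2.2)
        else if gender = some "Women" then (q.1, q.2.1 ++ [item], q.2.2)
        else (q.1, q.2.1, q.2.2 ++ [item]))
      (m, w, o)
    = (m ++ l.filter (fun p => pyDictGet p "target_gender" == some "Men"),
       w ++ l.filter (fun p => pyDictGet p "target_gender" == some "Women"),
       o ++ l.filter (fun p => !(pyDictGet p "target_gender" == some "Men" || pyDictGet p "target_gender" == some "Women"))) := by
  induction l generalizing m w o with
  | nil => simp
  | cons h t ih =>
    by_cases hm : pyDictGet h "target_gender" = some "Men"
    · simp [List.foldl_cons, hm, ih]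
    · by_cases hw : pyDictGet h "target_gender" = some "Women"
      · simp [List.foldl_cons, hw, ih]
      · simp [List.foldl_cons, hm, hw, ih]

theorem aLoop_eq_inter (a : List (List (String × String))) :
    ∀ (b acc : List (List (String × String))), aLoop a b acc = acc ++ inter a b := by
  induction a with
  | nil =>
    intro b
    induction b with
    | nil => intro acc; simp [aLoop, inter]
    | cons y ys ih => intro acc; simp [aLoop, inter, ih]
  | cons x xs ih =>
    intro b acc
    cases b with
    | nil => simp [aLoop, inter, ih]
    | cons y ys => simp [aLoop, inter, ih]

-- B-side structural lemmas -------------------------------------------------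

theorem bRankLoop_eq (l : List (List (String × String))) :
    ∀ (pr : String) (n sm sw s : Int) (acc : List Int),
      bRankLoop (PySem.List.enumerate l s) pr n sm sw acc = acc ++ ranksOf l pr n sm sw s := by
  induction l with
  | nil => intro pr n sm sw s acc; simp [PySem.List.enumerate_nil, bRankLoop, ranksOf]
  | cons p t ih =>
    intro pr n sm sw s acc
    rw [PySem.List.enumerate_cons]
    by_cases hm : pyDictGet p "target_gender" = some "Men"
    · simp [bRankLoop, ranksOf, hm, ih]
    · by_cases hw : pyDictGet p "target_gender" = some "Women"
      · simp [bRankLoop, ranksOf, hw, ih]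
      · simp [bRankLoop, ranksOf, hm, hw, ih]

theorem zip_ranksOf (l : List (List (String × String))) :
    ∀ (pr : String) (n sm sw s : Int),
      (ranksOf l pr n sm sw s).zip l = keyedOf l pr n sm sw s := by
  induction l with
  | nil => intro pr n sm sw s; simp [ranksOf, keyedOf]
  | cons p t ih =>
    intro pr n sm sw s
    by_cases hm : pyDictGet p "target_gender" = some "Men"
    · simp [ranksOf, keyedOf, hm, ih]
    · by_cases hw : pyDictGet p "target_gender" = some "Women"
      · simp [ranksOf, keyedOf, hw, ih]
      · simp [ranksOf, keyedOf, hm, hw, ih]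

-- keyedOf splits (up to permutation) into the three labeled groups
theorem keyedOf_perm (l : List (List (String × String))) :
    ∀ (pr : String) (n sm sw s : Int),
      (keyedOf l pr n sm sw s).Perm
        (label (l.filter (fun p => pyDictGet p "target_gender" == some "Men")) sm (fun j => if pr = "Men" then 2 * j else 2 * j + 1)
          ++ label (l.filter (fun p => pyDictGet p "target_gender" == some "Women")) sw (fun j => if pr = "Women" then 2 * j else 2 * j + 1)
          ++ labelO l n s) := by
  induction l with
  | nil => intro pr n sm sw s; simp [keyedOf, labelO, label]
  | cons p t ih =>
    intro pr n sm sw s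
    by_cases hm : pyDictGet p "target_gender" = some "Men"
    · simpa [keyedOf, labelO, label, hm] using
        (ih pr n (sm + 1) sw (s + 1)).cons ((if pr = "Men" then 2 * sm else 2 * sm + 1), p)
    · by_cases hw : pyDictGet p "target_gender" = some "Women"
      · have h0 := (ih pr n sm (sw + 1) (s + 1)).cons
          ((if pr = "Women" then 2 * sw else 2 * sw + 1), p)
        rw [List.append_assoc] at h0
        have h := h0.trans List.perm_middle.symm
        simpa [keyedOf, labelO, label, hm, hw, List.append_assoc] using h
      · have h := ((ih pr n sm sw (s + 1)).cons (2 * n + s, p)).trans List.perm_middle.symm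
        simpa [keyedOf, labelO, label, hm, hw, List.append_assoc] using h

-- interleave is a permutation of the concatenation
theorem inter_perm {α : Type} (a : List α) :
    ∀ b : List α, (inter a b).Perm (a ++ b) := by
  induction a with
  | nil =>
    intro b
    induction b with
    | nil => simp [inter]
    | cons y ys ih => simpa [inter] using ih.cons y
  | cons x xs ih =>
    intro b
    cases b with
    | nil => simpa [inter] using (ih []).cons x
    | cons y ys =>
      have h := ((ih ys).cons y).trans (List.perm_middle.symm)
      simpa [inter] using (h.cons x)

-- map snd facts
theorem map_snd_label (l : List (List (String × String))) :
    ∀ (j : Int) (f : Int → Int), (label l j f).map (fun t => t.2) = l := by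
  induction l with
  | nil => intro j f; simp [label]
  | cons x t ih => intro j f; simp [label, ih]

theorem map_snd_labelO (l : List (List (String × String))) :
    ∀ (n s : Int), (labelO l n s).map (fun t => t.2)
      = l.filter (fun p => !(pyDictGet p "target_gender" == some "Men" || pyDictGet p "target_gender" == some "Women")) := by
  induction l with
  | nil => intro n s; simp [labelO]
  | cons p t ih =>
    intro n s
    by_cases hm : pyDictGet p "target_gender" = some "Men"
    · simp [labelO, hm, ih]
    · by_cases hw : pyDictGet p "target_gender" = some "Women"
      · simp [labelO, hw, ih]
      · simp [labelO, hm, hw, ih]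

theorem map_snd_inter (a : List (Int × List (String × String))) :
    ∀ b, (inter a b).map (fun t => t.2) = inter (a.map (fun t => t.2)) (b.map (fun t => t.2)) := by
  induction a with
  | nil =>
    intro b
    induction b with
    | nil => simp [inter]
    | cons y ys ih => simp [inter, ih]
  | cons x xs ih =>
    intro b
    cases b with
    | nil => simp [inter, ih]
    | cons y ys => simp [inter, ih]

-- order facts --------------------------------------------------------------

-- keys of an even-keyed label: pairwise < and bounded
theorem label_even_facts (a : List (List (String × String))) :
    ∀ j : Int, (label a j (fun i => 2 * i)).Pairwise (fun x y => x.1 < y.1)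
      ∧ ∀ q ∈ label a j (fun i => 2 * i), 2 * j ≤ q.1 ∧ q.1 < 2 * (j + a.length) := by
  induction a with
  | nil => intro j; simp [label]
  | cons x t ih =>
    intro j
    obtain ⟨hp, hb⟩ := ih (j + 1)
    constructor
    · simp only [label]
      refine List.Pairwise.cons ?_ hp
      intro q hq
      have := (hb q hq).1
      show (2 * j, x).1 < q.1
      simp only
      omega
    · intro q hq
      simp only [label, List.mem_cons] at hq
      rcases hq with rfl | hq
      · simp only [List.length_cons]
        push_cast
        omega
      · have := hb q hq
        simp only [List.length_cons] at this ⊢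
        push_cast at this ⊢
        omega

-- interleave with an empty right list
theorem inter_nil_right {α : Type} (l : List α) : inter l [] = l := by
  induction l with
  | nil => simp [inter]
  | cons z zs ihz => simp [inter, ihz]

-- keys of the interleave of an even-keyed and an odd-keyed label (|b| ≤ |a|)
theorem inter_label_facts (a : List (List (String × String))) :
    ∀ (b : List (List (String × String))) (j : Int), b.length ≤ a.length →
      (inter (label a j (fun i => 2 * i)) (label b j (fun i => 2 * i + 1))).Pairwise (fun x y => x.1 < y.1)
      ∧ ∀ q ∈ inter (label a j (fun i => 2 * i)) (label b j (fun i => 2 * i + 1)),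
          2 * j ≤ q.1 ∧ q.1 < 2 * (j + a.length) := by
  induction a with
  | nil =>
    intro b j hb
    have : b = [] := List.eq_nil_of_length_eq_zero (Nat.le_zero.mp hb)
    subst this; simp [label, inter]
  | cons x t ih =>
    intro b j hb
    cases b with
    | nil =>
      have h := label_even_facts (x :: t) j
      rw [show label ([] : List (List (String × String))) j (fun i => 2 * i + 1) = [] from rfl,
        inter_nil_right]
      exact h
    | cons y bs =>
      have hb' : bs.length ≤ t.length := by simpa using hb
      obtain ⟨hp, hbnd⟩ := ih bs (j + 1) hb'
      simp only [label, inter]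
      constructor
      · refine List.Pairwise.cons ?_ (List.Pairwise.cons ?_ hp)
        · intro q hq
          simp only [List.mem_cons] at hq
          rcases hq with rfl | hq
          · show (2 * j, x).1 < (2 * j + 1, y).1
            simp only
            omega
          · have := (hbnd q hq).1
            show (2 * j, x).1 < q.1
            simp only
            omega
        · intro q hq
          have := (hbnd q hq).1
          show (2 * j + 1, y).1 < q.1
          simp only
          omega
      · intro q hq
        simp only [List.mem_cons] at hq
        rcases hq with rfl | rfl | hq
        · simp only [List.length_cons]
          push_cast
          omega
        · simp only [List.length_cons]
          push_cast
          omega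
        · have := hbnd q hq
          simp only [List.length_cons] at this ⊢
          push_cast at this ⊢
          omega

theorem labelO_facts (l : List (List (String × String))) :
    ∀ (n s : Int), (labelO l n s).Pairwise (fun x y => x.1 < y.1)
      ∧ ∀ q ∈ labelO l n s, 2 * n + s ≤ q.1 := by
  induction l with
  | nil => intro n s; simp [labelO]
  | cons p t ih =>
    intro n s
    obtain ⟨hp, hb⟩ := ih n (s + 1)
    by_cases hm : pyDictGet p "target_gender" = some "Men"
    · have hd : labelO (p :: t) n s = labelO t n (s + 1) := by simp [labelO, hm]
      rw [hd]
      exact ⟨hp, fun q hq => by have := hb q hq; omega⟩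
    · by_cases hw : pyDictGet p "target_gender" = some "Women"
      · have hd : labelO (p :: t) n s = labelO t n (s + 1) := by simp [labelO, hw]
        rw [hd]
        exact ⟨hp, fun q hq => by have := hb q hq; omega⟩
      · have hd : labelO (p :: t) n s = (2 * n + s, p) :: labelO t n (s + 1) := by
          simp [labelO, hm, hw]
        rw [hd]
        constructor
        · refine List.Pairwise.cons ?_ hp
          intro q hq
          have := hb q hq
          show (2 * n + s, p).1 < q.1
          simp only
          omega
        · intro q hq
          rcases List.mem_cons.mp hq with rfl | hq
          · simp
          · have := hb q hq; omega

-- the 0/1 sum is the filtered length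
theorem sum_ite_eq_filter_length (l : List (List (String × String))) (g : String) :
    (l.map (fun p => if pyDictGet p "target_gender" = some g then (1 : Int) else 0)).sum
      = ((l.filter (fun p => pyDictGet p "target_gender" == some g)).length : Int) := by
  induction l with
  | nil => simp
  | cons p t ih =>
    by_cases h : pyDictGet p "target_gender" = some g
    · simp [h, ih]; omega
    · simp [h, ih]

-- filter length bound as integers
theorem filter_len_le (l : List (List (String × String))) (f : List (String × String) → Bool) :
    ((l.filter f).length : Int) ≤ (l.length : Int) := by
  exact_mod_cast List.length_filter_le f l

-- ===== VERDICT (by name: the statement is the Claim_ definition above) =====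
theorem balance_gender_sequence_py_spec : Claim_equal_balance_gender_sequence_py := by
  intro products _
  unfold Spec_balance_gender_sequence_py balance_gender_sequence_py balance_gender_sequence_py_alt
  simp only [partition_eq, List.nil_append]
  set M := products.filter (fun p => pyDictGet p "target_gender" == some "Men") with hM
  set W := products.filter (fun p => pyDictGet p "target_gender" == some "Women") with hW
  set n : Int := (products.length : Int) with hn
  rw [sum_ite_eq_filter_length products "Men", sum_ite_eq_filter_length products "Women", ← hM, ← hW]
  rw [bRankLoop_eq, List.nil_append, zip_ranksOf]
  have hfunW : (fun j : Int => if ("Women" : String) = "Men" then 2 * j else 2 * j + 1)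
      = (fun i : Int => 2 * i + 1) := by funext i; simp
  have hfunW2 : (fun j : Int => if ("Women" : String) = "Women" then 2 * j else 2 * j + 1)
      = (fun i : Int => 2 * i) := by funext i; simp
  have hfunM : (fun j : Int => if ("Men" : String) = "Men" then 2 * j else 2 * j + 1)
      = (fun i : Int => 2 * i) := by funext i; simp
  have hfunM2 : (fun j : Int => if ("Men" : String) = "Women" then 2 * j else 2 * j + 1)
      = (fun i : Int => 2 * i + 1) := by funext i; simp
  by_cases hc : (W.length : Int) > (M.length : Int)
  · -- primary = "Women"
    have hcN : W.length > M.length := by exact_mod_cast hc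
    have h1 := keyedOf_perm products "Women" n 0 0 0
    rw [hfunW, hfunW2, ← hM, ← hW] at h1
    have hkey : PySem.List.sorted (keyedOf products "Women" n 0 0 0) (fun t => t.1) false
        = inter (label W 0 (fun i => 2 * i)) (label M 0 (fun i => 2 * i + 1)) ++ labelO products n 0 := by
      apply PySem.List.sorted_eq_of_perm_of_pairwise_lt
      · have h2 : (inter (label W 0 (fun i => 2 * i)) (label M 0 (fun i => 2 * i + 1))).Perm
            (label W 0 (fun i => 2 * i) ++ label M 0 (fun i => 2 * i + 1)) := inter_perm _ _
        exact (h2.append_right _).trans ((List.perm_append_comm.append_right _).trans h1.symm)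
      · have hMle : M.length ≤ W.length := Nat.le_of_lt hcN
        obtain ⟨hp1, hb1⟩ := inter_label_facts W M 0 hMle
        obtain ⟨hp2, hb2⟩ := labelO_facts products n 0
        rw [List.pairwise_append]
        refine ⟨hp1, hp2, ?_⟩
        intro x hx y hy
        have h3 := (hb1 x hx).2
        have h4 := hb2 y hy
        have hWn : (W.length : Int) ≤ n := by rw [hn, hW]; exact filter_len_le _ _
        omega
    rw [if_pos hcN, if_pos hcN, if_pos hc, hkey, aLoop_eq_inter, List.nil_append,
        List.map_append, map_snd_inter, map_snd_label, map_snd_label, map_snd_labelO]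
  · -- primary = "Men"
    have hcN : ¬ W.length > M.length := by exact_mod_cast hc
    have hWle : W.length ≤ M.length := Nat.le_of_not_lt hcN
    have h1 := keyedOf_perm products "Men" n 0 0 0
    rw [hfunM, hfunM2, ← hM, ← hW] at h1
    have hkey : PySem.List.sorted (keyedOf products "Men" n 0 0 0) (fun t => t.1) false
        = inter (label M 0 (fun i => 2 * i)) (label W 0 (fun i => 2 * i + 1)) ++ labelO products n 0 := by
      apply PySem.List.sorted_eq_of_perm_of_pairwise_lt
      · have h2 : (inter (label M 0 (fun i => 2 * i)) (label W 0 (fun i => 2 * i + 1))).Perm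
            (label M 0 (fun i => 2 * i) ++ label W 0 (fun i => 2 * i + 1)) := inter_perm _ _
        exact (h2.append_right _).trans h1.symm
      · obtain ⟨hp1, hb1⟩ := inter_label_facts M W 0 hWle
        obtain ⟨hp2, hb2⟩ := labelO_facts products n 0
        rw [List.pairwise_append]
        refine ⟨hp1, hp2, ?_⟩
        intro x hx y hy
        have h3 := (hb1 x hx).2
        have h4 := hb2 y hy
        have hMn : (M.length : Int) ≤ n := by rw [hn, hM]; exact filter_len_le _ _
        omega
    rw [if_neg hcN, if_neg hcN, if_neg hc, hkey, aLoop_eq_inter, List.nil_append,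
        List.map_append, map_snd_inter, map_snd_label, map_snd_label, map_snd_labelO]
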